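-- pv_equiv track=rewrite | github.com/ksananth4424/BCI_Inference_Time | bci_src/verification/claim_verification.py | spatial_relation_matches
-- ===== SOURCE A (Python) =====
-- def spatial_relation_matches(claimed: str, actual: str) -> bool:
--     """Check if two spatial relation descriptions match."""
--     synonyms = {
--         "left of": {"to the left of", "left of"},
--         "right of": {"to the right of", "right of"},
--         "above": {"above", "over", "on top of"},
--         "below": {"below", "under", "beneath", "underneath"},
--         "next to": {"next to", "beside", "near", "adjacent to"},
--         "behind": {"behind", "in back of"},
--         "in front of": {"in front of", "before"},
--     }
--     for _, group in synonyms.items():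
--         if claimed in group and actual in group:
--             return True
--     return claimed == actual
-- ===== SOURCE B (Python) =====
-- _CANON = {
--     "to the left of": "left of", "left of": "left of",
--     "to the right of": "right of", "right of": "right of",
--     "above": "above", "over": "above", "on top of": "above",
--     "below": "below", "under": "below", "beneath": "below", "underneath": "below",
--     "next to": "next to", "beside": "next to", "near": "next to", "adjacent to": "next to",
--     "behind": "behind", "in back of": "behind",
--     "in front of": "in front of", "before": "in front of",
-- }
--
--
-- def spatial_relation_matches(claimed: str, actual: str) -> bool:
--     """Check if two spatial relation descriptions match."""
--     return _CANON.get(claimed, claimed) == _CANON.get(actual, actual)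
-- ===== Notes on version B (the rewrite author's own statement) =====
-- stated objective: simpler
-- what changed: Replaced the loop over synonym groups with a single pre-inverted phrase-to-canonical map queried once per argument (mapping.get(x, x)) and one equality comparison.
import Mathlib
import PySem

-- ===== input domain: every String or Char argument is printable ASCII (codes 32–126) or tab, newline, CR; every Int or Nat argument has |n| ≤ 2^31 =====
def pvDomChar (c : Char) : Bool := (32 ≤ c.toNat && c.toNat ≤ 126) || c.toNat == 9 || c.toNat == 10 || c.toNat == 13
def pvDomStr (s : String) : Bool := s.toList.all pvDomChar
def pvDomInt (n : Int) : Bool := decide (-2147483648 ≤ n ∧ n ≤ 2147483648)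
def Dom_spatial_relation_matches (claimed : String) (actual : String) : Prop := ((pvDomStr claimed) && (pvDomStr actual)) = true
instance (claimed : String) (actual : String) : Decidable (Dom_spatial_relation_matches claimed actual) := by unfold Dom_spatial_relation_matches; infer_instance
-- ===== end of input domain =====

-- B replaces A's scan over synonym groups by one pre-inverted phrase→canonical map and a single comparison (objective: simpler).

-- ===== PORT A =====
def pvSynonyms : List (String × PySem.Set String) :=
  [ ("left of", PySem.Set.ofList ["to the left of", "left of"]),
    ("right of", PySem.Set.ofList ["to the right of", "right of"]),
    ("above", PySem.Set.ofList ["above", "over", "on top of"]),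
    ("below", PySem.Set.ofList ["below", "under", "beneath", "underneath"]),
    ("next to", PySem.Set.ofList ["next to", "beside", "near", "adjacent to"]),
    ("behind", PySem.Set.ofList ["behind", "in back of"]),
    ("in front of", PySem.Set.ofList ["in front of", "before"]) ]

-- the for-loop over synonyms.items(): first group containing both → True, else fall through
def pvLoopA (claimed : String) (actual : String) : List (String × PySem.Set String) → Bool
  | [] => claimed == actual
  | (_, g) :: rest => if claimed ∈ g ∧ actual ∈ g then true else pvLoopA claimed actual rest

def spatial_relation_matches (claimed : String) (actual : String) : Bool :=
  pvLoopA claimed actual pvSynonyms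

-- ===== PORT B =====
def pvCanon : PySem.Dict String String :=
  PySem.Dict.ofList
    [ ("to the left of", "left of"), ("left of", "left of"),
      ("to the right of", "right of"), ("right of", "right of"),
      ("above", "above"), ("over", "above"), ("on top of", "above"),
      ("below", "below"), ("under", "below"), ("beneath", "below"), ("underneath", "below"),
      ("next to", "next to"), ("beside", "next to"), ("near", "next to"), ("adjacent to", "next to"),
      ("behind", "behind"), ("in back of", "behind"),
      ("in front of", "in front of"), ("before", "in front of") ]

def spatial_relation_matches_alt (claimed : String) (actual : String) : Bool :=
  (pvCanon.getD claimed claimed) == (pvCanon.getD actual actual)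

-- ===== PRECONDITION & SPEC =====
def Spec_spatial_relation_matches (claimed : String) (actual : String) (out : Bool) : Prop := out = spatial_relation_matches_alt claimed actual
instance (claimed : String) (actual : String) (out : Bool) : Decidable (Spec_spatial_relation_matches claimed actual out) := by unfold Spec_spatial_relation_matches; infer_instance

-- ===== CLAIM (what is proved, stated in full; the proofs are below) =====
def Claim_equal_spatial_relation_matches : Prop := ∀ (claimed : String) (actual : String), Dom_spatial_relation_matches claimed actual → Spec_spatial_relation_matches claimed actual (spatial_relation_matches claimed actual)

-- ===== LEMMAS AND PROOFS =====

-- all phrases that occur in any synonym group (= the keys of pvCanon)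
def pvAllP : List String :=
  [ "to the left of", "left of", "to the right of", "right of",
    "above", "over", "on top of",
    "below", "under", "beneath", "underneath",
    "next to", "beside", "near", "adjacent to",
    "behind", "in back of",
    "in front of", "before" ]

-- on phrases of the table the two ports agree (finite check)
theorem pv_both_mem :
    ∀ c ∈ pvAllP, ∀ a ∈ pvAllP,
      spatial_relation_matches c a = spatial_relation_matches_alt c a := by decide

theorem pv_canon_mem : ∀ s ∈ pvAllP, pvCanon.getD s s ∈ pvAllP := by decide

-- pvCanon as a literal Dict.mk (its keys are distinct, so update just appends)
theorem pv_canon_items : pvCanon = PySem.Dict.mk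
    [ ("to the left of", "left of"), ("left of", "left of"),
      ("to the right of", "right of"), ("right of", "right of"),
      ("above", "above"), ("over", "above"), ("on top of", "above"),
      ("below", "below"), ("under", "below"), ("beneath", "below"), ("underneath", "below"),
      ("next to", "next to"), ("beside", "next to"), ("near", "next to"), ("adjacent to", "next to"),
      ("behind", "behind"), ("in back of", "behind"),
      ("in front of", "in front of"), ("before", "in front of") ] := by decide

theorem pv_canon_not_mem (s : String) (h : s ∉ pvAllP) : pvCanon.getD s s = s := by
  simp only [pvAllP, List.mem_cons, List.not_mem_nil, or_false, not_or] at h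
  obtain ⟨h1,h2,h3,h4,h5,h6,h7,h8,h9,h10,h11,h12,h13,h14,h15,h16,h17,h18,h19⟩ := h
  rw [pv_canon_items]
  simp [PySem.Dict.getD, PySem.Dict.get?_mk_cons, PySem.Dict.get?,
        Ne.symm h1, Ne.symm h2, Ne.symm h3, Ne.symm h4, Ne.symm h5, Ne.symm h6, Ne.symm h7,
        Ne.symm h8, Ne.symm h9, Ne.symm h10, Ne.symm h11, Ne.symm h12, Ne.symm h13, Ne.symm h14,
        Ne.symm h15, Ne.symm h16, Ne.symm h17, Ne.symm h18, Ne.symm h19]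

theorem pv_loopA_not_mem_left (c a : String) (h : c ∉ pvAllP) :
    spatial_relation_matches c a = (c == a) := by
  simp only [pvAllP, List.mem_cons, List.not_mem_nil, or_false, not_or] at h
  obtain ⟨h1,h2,h3,h4,h5,h6,h7,h8,h9,h10,h11,h12,h13,h14,h15,h16,h17,h18,h19⟩ := h
  simp [spatial_relation_matches, pvSynonyms, pvLoopA,
        h1,h2,h3,h4,h5,h6,h7,h8,h9,h10,h11,h12,h13,h14,h15,h16,h17,h18,h19]

theorem pv_loopA_not_mem_right (c a : String) (h : a ∉ pvAllP) :
    spatial_relation_matches c a = (c == a) := by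
  simp only [pvAllP, List.mem_cons, List.not_mem_nil, or_false, not_or] at h
  obtain ⟨h1,h2,h3,h4,h5,h6,h7,h8,h9,h10,h11,h12,h13,h14,h15,h16,h17,h18,h19⟩ := h
  simp [spatial_relation_matches, pvSynonyms, pvLoopA,
        h1,h2,h3,h4,h5,h6,h7,h8,h9,h10,h11,h12,h13,h14,h15,h16,h17,h18,h19]

-- ===== VERDICT (by name: the statement is the Claim_ definition above) =====
theorem spatial_relation_matches_spec : Claim_equal_spatial_relation_matches := by
  intro c a _
  unfold Spec_spatial_relation_matches
  by_cases hc : c ∈ pvAllP <;> by_cases ha : a ∈ pvAllP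
  · exact pv_both_mem c hc a ha
  · -- c in table, a not: both sides are false
    rw [pv_loopA_not_mem_right c a ha]
    have hcc := pv_canon_mem c hc
    have hca := pv_canon_not_mem a ha
    simp only [spatial_relation_matches_alt, hca]
    have h1 : c ≠ a := fun e => ha (e ▸ hc)
    have h2 : pvCanon.getD c c ≠ a := fun e => ha (e ▸ hcc)
    simp [h1, h2]
  · rw [pv_loopA_not_mem_left c a hc]
    have hca := pv_canon_mem a ha
    have hcc := pv_canon_not_mem c hc
    simp only [spatial_relation_matches_alt, hcc]
    have h1 : c ≠ a := fun e => hc (e ▸ ha)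
    have h2 : c ≠ pvCanon.getD a a := fun e => hc (e ▸ hca)
    simp [h1, h2]
  · rw [pv_loopA_not_mem_left c a hc]
    simp [spatial_relation_matches_alt, pv_canon_not_mem c hc, pv_canon_not_mem a ha]
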